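-- pv_equiv track=rewrite | github.com/carllikan/I-Can-Study-System-v1.0 | ICS_Bitbucket_repo/cloudrun_source/mind_map_evaluation_pipeline/check_patterns.py | get_unique_levels
-- ===== SOURCE A (Python) =====
-- def get_unique_levels(node, node_levels, connection_map, visited=None):
--     """
--     Recursively identifies unique levels reachable from a given node in the mind map.
--
--     Parameters:
--     node (str): The starting node ID.
--     node_levels (dict): A dictionary mapping node IDs to their levels.
--     connection_map (dict): A dictionary mapping node IDs to their connected nodes.
--     visited (set): A set of visited nodes to avoid cycles.
--
--     Returns:
--     set: A set of unique levels reachable from the given node.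
--     """
--     if visited is None:
--         visited = set()
--
--     visited.add(node)
--     unique_levels = {node_levels[node]}
--
--     for conn in connection_map.get(node, []):
--         if conn not in visited:
--             unique_levels.update(get_unique_levels(conn, node_levels, connection_map, visited))
--
--     return unique_levels
-- ===== SOURCE B (Python) =====
-- def get_unique_levels(node, node_levels, connection_map, visited=None):
--     """
--     Iterative DFS with an explicit stack instead of recursion: mark the start
--     node, then pop nodes from the stack, skipping already-visited ones, adding
--     each newly visited node's level and pushing its unvisited neighbours
--     (reversed, so they are popped in their original order).
--     Mutates the caller-supplied `visited` set exactly like the recursive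
--     version (same final contents).
--     """
--     if visited is None:
--         visited = set()
--     visited.add(node)
--     unique_levels = {node_levels[node]}
--     stack = [c for c in reversed(connection_map.get(node, [])) if c not in visited]
--     while stack:
--         n = stack.pop()
--         if n in visited:
--             continue
--         visited.add(n)
--         unique_levels.add(node_levels[n])
--         for c in reversed(connection_map.get(n, [])):
--             if c not in visited:
--                 stack.append(c)
--     return unique_levels
-- ===== Notes on version B (the rewrite author's own statement) =====
-- stated objective: alternative
-- what changed: Replaced A's recursive DFS (mutating a shared visited set and unioning per-call level sets) by an iterative DFS with an explicit stack that accumulates the level set in a single loop.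
import Mathlib
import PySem

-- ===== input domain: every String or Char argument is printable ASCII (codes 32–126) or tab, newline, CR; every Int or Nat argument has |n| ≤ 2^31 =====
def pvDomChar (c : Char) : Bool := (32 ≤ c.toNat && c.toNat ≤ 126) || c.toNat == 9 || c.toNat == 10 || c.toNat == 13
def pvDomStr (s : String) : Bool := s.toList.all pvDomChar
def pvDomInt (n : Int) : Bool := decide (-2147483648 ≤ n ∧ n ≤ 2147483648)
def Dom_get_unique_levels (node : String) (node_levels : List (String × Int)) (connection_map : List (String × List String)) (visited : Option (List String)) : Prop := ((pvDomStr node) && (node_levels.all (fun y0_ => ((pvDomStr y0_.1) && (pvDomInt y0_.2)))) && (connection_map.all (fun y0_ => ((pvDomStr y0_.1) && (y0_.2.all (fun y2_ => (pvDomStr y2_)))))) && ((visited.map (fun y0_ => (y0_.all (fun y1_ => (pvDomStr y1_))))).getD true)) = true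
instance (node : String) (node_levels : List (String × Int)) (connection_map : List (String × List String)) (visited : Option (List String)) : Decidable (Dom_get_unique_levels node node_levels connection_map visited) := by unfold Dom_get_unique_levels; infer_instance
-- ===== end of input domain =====

-- B replaces A's recursion by an iterative DFS over an explicit stack (alternative decomposition,
-- same asymptotic cost). Both A and B mutate the caller-supplied `visited` set (to the same final
-- contents); the equivalence proved here is about the RETURN value.

-- shared helpers (both Pythons read the same two dicts the same way)
-- node_levels[n] — Pre_ guarantees the key is present for every node the DFS reaches (Python
-- raises KeyError otherwise), so the default is never read on admitted inputs
def pvLevel (node_levels : List (String × Int)) (n : String) : Int :=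
  ((PySem.Dict.mk node_levels).get? n).getD 0

-- connection_map.get(n, [])
def pvConns (connection_map : List (String × List String)) (n : String) : List String :=
  ((PySem.Dict.mk connection_map).get? n).getD []

-- every node that can ever be newly visited is a listed neighbour; |pvUniv|+1 is a sufficient fuel
def pvUniv (connection_map : List (String × List String)) : List String :=
  (connection_map.map Prod.snd).flatten

-- ===== PORT A =====
-- recursive DFS; the Python's shared mutable `visited` set is threaded through as the second
-- state/result component; fuel (never exhausted, see the lemmas) makes the recursion total
def goA (nl : List (String × Int)) (cm : List (String × List String)) :
    Nat → String → PySem.Set String → PySem.Set Int × PySem.Set String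
  | 0, _, visited => (PySem.Set.empty, visited)   -- fuel guard; unreachable (fuel exceeds the number of unvisited nodes)
  | fuel+1, node, visited =>
    let visited := PySem.Set.add visited node                        -- visited.add(node)
    let init : PySem.Set Int := PySem.Set.ofList [pvLevel nl node]   -- unique_levels = {node_levels[node]}
    (pvConns cm node).foldl (fun st conn =>                          -- for conn in connection_map.get(node, []):
      if conn ∈ st.2 then st                                         --   if conn not in visited:
      else
        let r := goA nl cm fuel conn st.2                            --     r = get_unique_levels(conn, …, visited)
        (PySem.Set.update st.1 r.1, r.2))                            --     unique_levels.update(r)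
      (init, visited)

def get_unique_levels (node : String) (node_levels : List (String × Int)) (connection_map : List (String × List String)) (visited : Option (List String)) : List Int :=
  let v0 : PySem.Set String := PySem.Set.ofList (visited.getD [])    -- if visited is None: visited = set()
  (goA node_levels connection_map ((pvUniv connection_map).length + 1) node v0).1

-- ===== PORT B =====
-- iterative DFS: the while-loop over the explicit stack (stack top = list head; Python pushes the
-- reversed neighbour list at the right end, i.e. conses it in order at the head); fuel is consumed
-- only when a node is processed, so |pvUniv|+1 is sufficient (see the lemmas)
def goB (nl : List (String × Int)) (cm : List (String × List String)) :
    Nat → List String → PySem.Set Int → PySem.Set String → PySem.Set Int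
  | _, [], levels, _ => levels                                       -- while stack: … return unique_levels
  | 0, _ :: _, levels, _ => levels                                   -- fuel guard; unreachable
  | fuel+1, n :: rest, levels, visited =>
    if n ∈ visited then goB nl cm (fuel+1) rest levels visited       -- if n in visited: continue
    else
      let visited := PySem.Set.add visited n                         -- visited.add(n)
      let levels := PySem.Set.add levels (pvLevel nl n)              -- unique_levels.add(node_levels[n])
      goB nl cm fuel                                                 -- push unvisited neighbours
        ((pvConns cm n).filter (fun c => !(PySem.Set.contains visited c)) ++ rest)
        levels visited
  termination_by fuel stack => (fuel, stack.length)

def get_unique_levels_alt (node : String) (node_levels : List (String × Int)) (connection_map : List (String × List String)) (visited : Option (List String)) : List Int :=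
  let v0 : PySem.Set String := PySem.Set.ofList (visited.getD [])    -- if visited is None: visited = set()
  let v1 : PySem.Set String := PySem.Set.add v0 node                 -- visited.add(node)
  let levels : PySem.Set Int := PySem.Set.ofList [pvLevel node_levels node]  -- {node_levels[node]}
  goB node_levels connection_map ((pvUniv connection_map).length + 1)
    ((pvConns connection_map node).filter (fun c => !(PySem.Set.contains v1 c)))  -- initial stack
    levels v1

-- ===== PRECONDITION & SPEC =====
-- pvReached computes the exact set of nodes whose level A (and B) looks up: the closure of {node}
-- under the edges of connection_map, never entering a node of the initial `visited` set.
-- One saturation step: add every neighbour of a member that is neither pre-visited nor present yet.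
def pvStep (cm : List (String × List String)) (v0 : List String) (S : List String) : List String :=
  S.foldl (fun acc x =>
    (pvConns cm x).foldl (fun acc c => if c ∈ acc ∨ c ∈ v0 then acc else acc ++ [c]) acc) S

def pvReached (node : String) (cm : List (String × List String)) (v0 : List String) : List String :=
  Nat.iterate (pvStep cm v0) ((pvUniv cm).length + 1) [node]

-- Pre_ excludes exactly the inputs on which the Python A raises KeyError: those where some node
-- reachable from `node` (through nodes not in the initial `visited` set) has no entry in
-- node_levels. On every other input A returns normally and B matches it.
def Pre_get_unique_levels (node : String) (node_levels : List (String × Int)) (connection_map : List (String × List String)) (visited : Option (List String)) : Prop :=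
  ∀ x ∈ pvReached node connection_map (visited.getD []), x ∈ node_levels.map Prod.fst
instance (node : String) (node_levels : List (String × Int)) (connection_map : List (String × List String)) (visited : Option (List String)) : Decidable (Pre_get_unique_levels node node_levels connection_map visited) := by unfold Pre_get_unique_levels; infer_instance

def pvWitness_get_unique_levels : String × (List (String × Int)) × (List (String × List String)) × Option (List String) :=
  ("a", [("a", 1), ("b", 2)], [("a", ["b"])], none)

def Spec_get_unique_levels (node : String) (node_levels : List (String × Int)) (connection_map : List (String × List String)) (visited : Option (List String)) (out : List Int) : Prop := out = get_unique_levels_alt node node_levels connection_map visited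
instance (node : String) (node_levels : List (String × Int)) (connection_map : List (String × List String)) (visited : Option (List String)) (out : List Int) : Decidable (Spec_get_unique_levels node node_levels connection_map visited out) := by unfold Spec_get_unique_levels; infer_instance

-- ===== CLAIM (what is proved, stated in full; the proofs are below) =====
def Claim_equal_get_unique_levels : Prop := ∀ (node : String) (node_levels : List (String × Int)) (connection_map : List (String × List String)) (visited : Option (List String)), Dom_get_unique_levels node node_levels connection_map visited → Pre_get_unique_levels node node_levels connection_map visited → Spec_get_unique_levels node node_levels connection_map visited (get_unique_levels node node_levels connection_map visited)

-- ===== LEMMAS AND PROOFS =====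

-- A's loop over a neighbour list, as a named function (definitionally the fold inside goA)
def foldA (nl : List (String × Int)) (cm : List (String × List String)) (fuel : Nat)
    (conns : List String) (st : PySem.Set Int × PySem.Set String) : PySem.Set Int × PySem.Set String :=
  conns.foldl (fun st conn =>
    if conn ∈ st.2 then st
    else
      let r := goA nl cm fuel conn st.2
      (PySem.Set.update st.1 r.1, r.2)) st

-- how many universe entries are still unvisited (A's recursion depth / B's processing count bound)
def pvUcount (cm : List (String × List String)) (v : PySem.Set String) : Nat :=
  ((pvUniv cm).filter (fun x => decide (x ∉ v))).length

lemma goA_succ (nl : List (String × Int)) (cm : List (String × List String)) (f : Nat) (n : String) (v : PySem.Set String) :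
    goA nl cm (f+1) n v = foldA nl cm f (pvConns cm n) (PySem.Set.ofList [pvLevel nl n], PySem.Set.add v n) := rfl

lemma foldA_nil (nl : List (String × Int)) (cm : List (String × List String)) (f : Nat) (st : PySem.Set Int × PySem.Set String) :
    foldA nl cm f [] st = st := rfl

lemma foldA_cons (nl : List (String × Int)) (cm : List (String × List String)) (f : Nat) (c : String) (cs : List String) (st : PySem.Set Int × PySem.Set String) :
    foldA nl cm f (c :: cs) st = foldA nl cm f cs
      (if c ∈ st.2 then st else (PySem.Set.update st.1 (goA nl cm f c st.2).1, (goA nl cm f c st.2).2)) := rfl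

lemma goB_nil (nl : List (String × Int)) (cm : List (String × List String)) (f : Nat) (a : PySem.Set Int) (w : PySem.Set String) :
    goB nl cm f [] a w = a := by cases f <;> simp [goB]

lemma goB_zero (nl : List (String × Int)) (cm : List (String × List String)) (s : List String) (a : PySem.Set Int) (w : PySem.Set String) :
    goB nl cm 0 s a w = a := by cases s <;> simp [goB]

lemma goB_skip (nl : List (String × Int)) (cm : List (String × List String)) (f : Nat) (n : String) (rest : List String) (a : PySem.Set Int) (w : PySem.Set String) (h : n ∈ w) :
    goB nl cm f (n :: rest) a w = goB nl cm f rest a w := by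
  cases f with
  | zero => simp [goB_zero]
  | succ f => simp [goB, h]

lemma goB_proc (nl : List (String × Int)) (cm : List (String × List String)) (f : Nat) (n : String) (rest : List String) (a : PySem.Set Int) (w : PySem.Set String) (h : n ∉ w) :
    goB nl cm (f+1) (n :: rest) a w = goB nl cm f
      ((pvConns cm n).filter (fun c => !(PySem.Set.contains (PySem.Set.add w n) c)) ++ rest)
      (PySem.Set.add a (pvLevel nl n)) (PySem.Set.add w n) := by
  simp [goB, h]

-- updating with a deduplicated list updates with the list itself
lemma update_ofList (a : PySem.Set Int) (xs : List Int) :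
    PySem.Set.update a (PySem.Set.ofList xs) = PySem.Set.update a xs := by
  rw [PySem.Set.update_eq_append_filter, PySem.Set.update_eq_append_filter, PySem.Set.ofList_ofList]

-- every neighbour returned by connection_map.get lies in pvUniv
lemma pvConns_subset (cm : List (String × List String)) (n x : String)
    (hx : x ∈ pvConns cm n) : x ∈ pvUniv cm := by
  induction cm with
  | nil => simp [pvConns, PySem.Dict.get?] at hx
  | cons p cm ih =>
    obtain ⟨k, l⟩ := p
    simp only [pvUniv, List.map_cons, List.flatten_cons, List.mem_append]
    by_cases hk : k == n
    · left
      simp only [pvConns, PySem.Dict.get?_mk_cons, hk, if_pos, Option.getD_some] at hx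
      exact hx
    · right
      simp only [pvConns, PySem.Dict.get?_mk_cons, hk, Bool.false_eq_true, if_false] at hx
      exact ih hx

lemma pvUcount_le (cm : List (String × List String)) (v : PySem.Set String) :
    pvUcount cm v ≤ (pvUniv cm).length := List.length_filter_le _ _

lemma pvUcount_append_lt (cm : List (String × List String)) (v : PySem.Set String)
    (conn : String) (hcu : conn ∈ pvUniv cm) (hc : conn ∉ v) :
    pvUcount cm (v ++ [conn]) < pvUcount cm v := by
  have hsub : List.Sublist ((pvUniv cm).filter (fun x => decide (x ∉ v ++ [conn])))
      ((pvUniv cm).filter (fun x => decide (x ∉ v))) := by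
    apply List.monotone_filter_right
    intro x hx
    simp only [decide_eq_true_eq, List.mem_append, List.mem_singleton] at hx ⊢
    exact fun hv => hx (Or.inl hv)
  have hmem : conn ∈ (pvUniv cm).filter (fun x => decide (x ∉ v)) :=
    List.mem_filter.2 ⟨hcu, by simpa using hc⟩
  have hnot : conn ∉ (pvUniv cm).filter (fun x => decide (x ∉ v ++ [conn])) := by
    simp [List.mem_filter]
  rcases Nat.lt_or_ge ((pvUniv cm).filter (fun x => decide (x ∉ v ++ [conn]))).length
      ((pvUniv cm).filter (fun x => decide (x ∉ v))).length with h | h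
  · exact h
  · exfalso
    have heq := hsub.eq_of_length (Nat.le_antisymm hsub.length_le h)
    rw [heq] at hnot
    exact hnot hmem

-- dropping stack entries that are already visited (by any subset vv of the current visited set)
-- does not change B's loop
lemma goB_filt (nl : List (String × Int)) (cm : List (String × List String)) :
    ∀ (f : Nat) (p xs r : List String) (a : PySem.Set Int) (w vv : PySem.Set String),
      (∀ y ∈ vv, y ∈ w) →
      goB nl cm f (p ++ xs.filter (fun c => !(PySem.Set.contains vv c)) ++ r) a w =
        goB nl cm f (p ++ xs ++ r) a w := by
  intro f
  induction f using Nat.strong_induction_on with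
  | _ f IHf =>
    intro p
    induction p with
    | cons y p' IHp =>
      intro xs r a w vv hsub
      by_cases hy : y ∈ w
      · simp only [List.cons_append]
        rw [goB_skip _ _ _ _ _ _ _ hy, goB_skip _ _ _ _ _ _ _ hy]
        exact IHp xs r a w vv hsub
      · cases f with
        | zero => simp [goB_zero]
        | succ f =>
          simp only [List.cons_append]
          rw [goB_proc _ _ _ _ _ _ _ hy, goB_proc _ _ _ _ _ _ _ hy]
          have h' : ∀ z ∈ vv, z ∈ PySem.Set.add w y := by
            intro z hz
            have := hsub z hz
            rw [PySem.Set.mem_add]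
            exact Or.inl this
          have := IHf f (Nat.lt_succ_self f)
            ((pvConns cm y).filter (fun c => !(PySem.Set.contains (PySem.Set.add w y) c)) ++ p')
            xs r (PySem.Set.add a (pvLevel nl y)) (PySem.Set.add w y) vv h'
          simpa [List.append_assoc] using this
    | nil =>
      intro xs
      induction xs with
      | nil => intro r a w vv hsub; simp
      | cons x xs' IHxs =>
        intro r a w vv hsub
        by_cases hx : x ∈ vv
        · have hxw : x ∈ w := hsub x hx
          have hcx : PySem.Set.contains vv x = true := (PySem.Set.contains_iff vv x).2 hx
          simp only [List.filter_cons, hcx, Bool.not_true, Bool.false_eq_true, if_false,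
            List.nil_append, List.cons_append]
          rw [goB_skip _ _ _ _ _ _ _ hxw]
          have := IHxs r a w vv hsub
          simpa using this
        · have hcx : (!(PySem.Set.contains vv x)) = true := by
            simpa using fun h => hx ((PySem.Set.contains_iff vv x).1 h)
          simp only [List.filter_cons, hcx, if_pos, List.nil_append, List.cons_append]
          by_cases hxw : x ∈ w
          · rw [goB_skip _ _ _ _ _ _ _ hxw, goB_skip _ _ _ _ _ _ _ hxw]
            have := IHxs r a w vv hsub
            simpa using this
          · cases f with
            | zero => simp [goB_zero]
            | succ f =>
              rw [goB_proc _ _ _ _ _ _ _ hxw, goB_proc _ _ _ _ _ _ _ hxw]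
              have h' : ∀ z ∈ vv, z ∈ PySem.Set.add w x := by
                intro z hz
                rw [PySem.Set.mem_add]
                exact Or.inl (hsub z hz)
              have := IHf f (Nat.lt_succ_self f)
                ((pvConns cm x).filter (fun c => !(PySem.Set.contains (PySem.Set.add w x) c)))
                xs' r (PySem.Set.add a (pvLevel nl x)) (PySem.Set.add w x) vv h'
              simpa [List.append_assoc] using this

-- A's neighbour loop is a homomorphism in the accumulated level set: starting it from
-- `update a b` yields `update a (b ++ τ)` for a trace τ (and a final visited set W)
-- that do not depend on a or b
lemma foldA_update (nl : List (String × Int)) (cm : List (String × List String)) (f : Nat) :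
    ∀ (conns : List String) (v : PySem.Set String),
      ∃ τ W, ∀ (a : PySem.Set Int) (b : List Int),
        foldA nl cm f conns (PySem.Set.update a b, v) = (PySem.Set.update a (b ++ τ), W) := by
  intro conns
  induction conns with
  | nil => exact fun v => ⟨[], v, fun a b => by simp [foldA_nil]⟩
  | cons c cs IH =>
    intro v
    by_cases hc : c ∈ v
    · obtain ⟨τ, W, hW⟩ := IH v
      exact ⟨τ, W, fun a b => by rw [foldA_cons]; simp only [hc, if_pos]; exact hW a b⟩
    · obtain ⟨τ2, W2, hW⟩ := IH (goA nl cm f c v).2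
      refine ⟨(goA nl cm f c v).1 ++ τ2, W2, fun a b => ?_⟩
      rw [foldA_cons]
      simp only [if_neg hc]
      simp only [← PySem.Set.update_append]
      rw [hW a (b ++ (goA nl cm f c v).1), List.append_assoc]

-- MAIN: running A's neighbour loop and then continuing B's stack loop from the same state
-- agree: B consumes exactly one unit of fuel per newly visited node (the list δ)
lemma main_sim (nl : List (String × Int)) (cm : List (String × List String)) :
    ∀ (f : Nat) (conns : List String) (a : PySem.Set Int) (v : PySem.Set String),
      v.Nodup → (∀ x ∈ conns, x ∈ pvUniv cm) → pvUcount cm v ≤ f →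
      ∃ δ : List String,
        (foldA nl cm f conns (a, v)).2 = v ++ δ ∧
        (v ++ δ).Nodup ∧
        (∀ x ∈ δ, x ∈ pvUniv cm) ∧
        pvUcount cm (v ++ δ) + δ.length ≤ pvUcount cm v ∧
        ∀ (rest : List String) (fB : Nat),
          goB nl cm (fB + δ.length) (conns ++ rest) a v =
            goB nl cm fB rest (foldA nl cm f conns (a, v)).1 (v ++ δ) := by
  intro f
  induction f using Nat.strong_induction_on with
  | _ f IHf =>
    intro conns
    induction conns with
    | nil =>
      intro a v hv _ _
      exact ⟨[], by simp [foldA_nil], by simpa using hv, by simp, by simp,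
        fun rest fB => by simp [foldA_nil]⟩
    | cons conn cs IHcs =>
      intro a v hv hconns hf
      by_cases hc : conn ∈ v
      · -- conn already visited: both sides skip it
        obtain ⟨δ, h1, h2, h3, h4, h5⟩ :=
          IHcs a v hv (fun x hx => hconns x (List.mem_cons_of_mem _ hx)) hf
        refine ⟨δ, ?_, h2, h3, h4, ?_⟩
        · rw [foldA_cons]; simp only [hc, if_pos]; exact h1
        · intro rest fB
          rw [List.cons_append, goB_skip _ _ _ _ _ _ _ hc, foldA_cons]
          simp only [hc, if_pos]
          exact h5 rest fB
      · -- conn is newly visited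
        have hcu : conn ∈ pvUniv cm := hconns conn List.mem_cons_self
        have hpos : 1 ≤ pvUcount cm v := by
          have hm : conn ∈ (pvUniv cm).filter (fun x => decide (x ∉ v)) :=
            List.mem_filter.2 ⟨hcu, by simpa using hc⟩
          have := List.ne_nil_of_mem hm
          have := List.length_pos_iff.2 this
          unfold pvUcount
          omega
        obtain ⟨f', rfl⟩ : ∃ f', f = f' + 1 := ⟨f - 1, by omega⟩
        have hv1eq : PySem.Set.add v conn = v ++ [conn] := PySem.Set.add_of_not_mem hc
        have hv1 : (PySem.Set.add v conn).Nodup := PySem.Set.nodup_add v conn hv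
        have hcount1 : pvUcount cm (PySem.Set.add v conn) < pvUcount cm v := by
          rw [hv1eq]; exact pvUcount_append_lt cm v conn hcu hc
        obtain ⟨τ, W, hτ⟩ := foldA_update nl cm f' (pvConns cm conn) (PySem.Set.add v conn)
        obtain ⟨δ1, g1, g2, g3, g4, g5⟩ :=
          IHf f' (Nat.lt_succ_self f') (pvConns cm conn)
            (PySem.Set.add a (pvLevel nl conn)) (PySem.Set.add v conn) hv1
            (fun x hx => pvConns_subset cm conn x hx) (by omega)
        have ha1 : PySem.Set.add a (pvLevel nl conn) = PySem.Set.update a [pvLevel nl conn] := by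
          rw [PySem.Set.update_cons, PySem.Set.update_nil]
        have hA1 : foldA nl cm f' (pvConns cm conn)
            (PySem.Set.add a (pvLevel nl conn), PySem.Set.add v conn) =
            (PySem.Set.update a ([pvLevel nl conn] ++ τ), W) := by
          rw [ha1]; exact hτ a [pvLevel nl conn]
        have hr : goA nl cm (f' + 1) conn v =
            (PySem.Set.ofList ([pvLevel nl conn] ++ τ), W) := by
          rw [goA_succ]
          rw [show (PySem.Set.ofList [pvLevel nl conn] : PySem.Set Int) =
              PySem.Set.update ([] : PySem.Set Int) [pvLevel nl conn] from
              (PySem.Set.update_nil_left _).symm]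
          rw [hτ ([] : PySem.Set Int) [pvLevel nl conn], PySem.Set.update_nil_left]
        have hW : W = PySem.Set.add v conn ++ δ1 := by
          rw [← g1, hA1]
        have hstep : foldA nl cm (f' + 1) (conn :: cs) (a, v) =
            foldA nl cm (f' + 1) cs
              (PySem.Set.update a ([pvLevel nl conn] ++ τ), PySem.Set.add v conn ++ δ1) := by
          rw [foldA_cons]
          simp only [hc, if_false]
          rw [hr]
          simp only [update_ofList, hW]
        obtain ⟨δ2, k1, k2, k3, k4, k5⟩ :=
          IHcs (PySem.Set.update a ([pvLevel nl conn] ++ τ)) (PySem.Set.add v conn ++ δ1) g2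
            (fun x hx => hconns x (List.mem_cons_of_mem _ hx)) (by omega)
        have hlist : ∀ t : List String, v ++ (conn :: (δ1 ++ δ2 ++ t)) =
            ((PySem.Set.add v conn ++ δ1) ++ δ2) ++ t := by
          intro t; rw [hv1eq]; simp [List.append_assoc]
        have hlist0 : v ++ (conn :: (δ1 ++ δ2)) = (PySem.Set.add v conn ++ δ1) ++ δ2 := by
          have := hlist []
          simpa using this
        refine ⟨conn :: (δ1 ++ δ2), ?_, ?_, ?_, ?_, ?_⟩
        · rw [hstep, k1, hlist0]
        · rw [hlist0]; exact k2
        · intro x hx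
          rcases List.mem_cons.1 hx with rfl | hx
          · exact hcu
          · rcases List.mem_append.1 hx with hx | hx
            · exact g3 x hx
            · exact k3 x hx
        · rw [hlist0]
          simp only [List.length_cons, List.length_append]
          omega
        · intro rest fB
          have harith : fB + (conn :: (δ1 ++ δ2)).length =
              ((fB + δ2.length) + δ1.length) + 1 := by
            simp only [List.length_cons, List.length_append]; omega
          rw [List.cons_append, harith, goB_proc _ _ _ _ _ _ _ hc]
          have hfilt := goB_filt nl cm ((fB + δ2.length) + δ1.length) []
            (pvConns cm conn) (cs ++ rest) (PySem.Set.add a (pvLevel nl conn))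
            (PySem.Set.add v conn) (PySem.Set.add v conn) (fun y hy => hy)
          simp only [List.nil_append] at hfilt
          rw [hfilt, g5 (cs ++ rest) (fB + δ2.length)]
          rw [show (foldA nl cm f' (pvConns cm conn)
              (PySem.Set.add a (pvLevel nl conn), PySem.Set.add v conn)).1 =
              PySem.Set.update a ([pvLevel nl conn] ++ τ) from by rw [hA1]]
          rw [k5 rest fB, hstep, hlist0]

theorem get_unique_levels_spec : Claim_equal_get_unique_levels := by
  intro node nl cm vis _ _
  unfold Spec_get_unique_levels get_unique_levels get_unique_levels_alt
  show (goA nl cm ((pvUniv cm).length + 1) node (PySem.Set.ofList (vis.getD []))).1 =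
    goB nl cm ((pvUniv cm).length + 1)
      ((pvConns cm node).filter (fun c =>
        !(PySem.Set.contains (PySem.Set.add (PySem.Set.ofList (vis.getD [])) node) c)))
      (PySem.Set.ofList [pvLevel nl node])
      (PySem.Set.add (PySem.Set.ofList (vis.getD [])) node)
  set U := (pvUniv cm).length with hU
  set v1 := PySem.Set.add (PySem.Set.ofList (vis.getD [])) node with hv1def
  have hv1 : v1.Nodup := PySem.Set.nodup_add _ _ (PySem.Set.nodup_ofList _)
  obtain ⟨δ, h1, h2, h3, h4, h5⟩ := main_sim nl cm U (pvConns cm node)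
    (PySem.Set.ofList [pvLevel nl node]) v1 hv1
    (fun x hx => pvConns_subset cm node x hx) (pvUcount_le cm v1)
  have hδ : δ.length ≤ U := by
    have h6 := pvUcount_le cm v1
    omega
  rw [goA_succ]
  have hfilt := goB_filt nl cm (U + 1) [] (pvConns cm node) []
    (PySem.Set.ofList [pvLevel nl node]) v1 v1 (fun y hy => hy)
  simp only [List.nil_append] at hfilt
  rw [show ((pvConns cm node).filter (fun c => !(PySem.Set.contains v1 c))) =
    ((pvConns cm node).filter (fun c => !(PySem.Set.contains v1 c))) ++ [] from
    (List.append_nil _).symm]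
  rw [hfilt]
  have harith : U + 1 = (U + 1 - δ.length) + δ.length := by omega
  rw [harith, h5 [] (U + 1 - δ.length), goB_nil]
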